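-- pv_equiv track=rewrite | github.com/thamyresr/Fund-Python | Exercicio 6.py | arrumar_numeros
-- ===== SOURCE A (Python) =====
-- def arrumar_numeros(numeros_inteiros):
--     numeros_impares = []
--     numeros_pares = ()
--     for indice in range(len(numeros_inteiros)):
--         if numeros_inteiros[indice] % 2 == 1:
--             numeros_impares.append(numeros_inteiros[indice])
--         if indice % 2 == 0:
--             numeros_pares += (numeros_inteiros[indice],)
--     return numeros_impares, numeros_pares
-- ===== SOURCE B (Python) =====
-- def arrumar_numeros(numeros_inteiros):
--     numeros_impares = [x for x in numeros_inteiros if x % 2 == 1]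
--     numeros_pares = tuple(numeros_inteiros[::2])
--     return numeros_impares, numeros_pares
-- ===== Notes on version B (the rewrite author's own statement) =====
-- stated objective: simpler
-- what changed: Replaces the single index loop with two separate passes: a value-filter comprehension for the odd values and a [::2] stride slice for the even-index tuple, avoiding A's quadratic tuple += rebuilding.
import Mathlib
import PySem

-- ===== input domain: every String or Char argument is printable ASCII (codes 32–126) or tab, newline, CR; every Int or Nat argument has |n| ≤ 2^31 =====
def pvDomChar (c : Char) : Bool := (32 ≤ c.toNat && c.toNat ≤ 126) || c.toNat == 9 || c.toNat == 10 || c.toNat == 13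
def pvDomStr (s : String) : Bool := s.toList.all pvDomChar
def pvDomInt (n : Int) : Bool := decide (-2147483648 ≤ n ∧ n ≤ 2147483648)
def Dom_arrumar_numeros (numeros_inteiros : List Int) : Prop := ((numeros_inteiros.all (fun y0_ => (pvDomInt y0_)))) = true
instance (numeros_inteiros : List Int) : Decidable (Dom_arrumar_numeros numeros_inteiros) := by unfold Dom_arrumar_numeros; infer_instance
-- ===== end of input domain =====

-- B computes the two results in separate passes: a value filter for the odds and a [::2] stride slice for the even-index tuple, replacing A's single index loop (objective: simpler).


-- ===== PORT A =====
def arrumar_numeros (numeros_inteiros : List Int) : List Int × List Int :=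
  -- for indice in range(len(..)): two ifs updating (numeros_impares, numeros_pares)
  (PySem.List.pyRange 0 numeros_inteiros.length 1).foldl
    (fun (st : List Int × List Int) (indice : Int) =>
      let st1 :=
        if PySem.Int.mod (PySem.List.pyGetD numeros_inteiros indice 0) 2 = 1 then
          (st.1 ++ [PySem.List.pyGetD numeros_inteiros indice 0], st.2)
        else st
      if PySem.Int.mod indice 2 = 0 then
        (st1.1, st1.2 ++ [PySem.List.pyGetD numeros_inteiros indice 0])
      else st1)
    ([], [])

-- ===== PORT B =====
def arrumar_numeros_alt (numeros_inteiros : List Int) : List Int × List Int :=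
  (numeros_inteiros.filter (fun x => PySem.Int.mod x 2 == 1),
   (PySem.List.slice? numeros_inteiros none none 2).getD [])

-- ===== PRECONDITION & SPEC =====
def Spec_arrumar_numeros (numeros_inteiros : List Int) (out : List Int × List Int) : Prop := out = arrumar_numeros_alt numeros_inteiros
instance (numeros_inteiros : List Int) (out : List Int × List Int) : Decidable (Spec_arrumar_numeros numeros_inteiros out) := by unfold Spec_arrumar_numeros; infer_instance

-- ===== CLAIM (what is proved, stated in full; the proofs are below) =====
def Claim_equal_arrumar_numeros : Prop := ∀ (numeros_inteiros : List Int), Dom_arrumar_numeros numeros_inteiros → Spec_arrumar_numeros numeros_inteiros (arrumar_numeros numeros_inteiros)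

-- ===== LEMMAS AND PROOFS =====

-- ===== VERDICT (by name: the statement is the Claim_ definition above) =====
-- every-other-element reference: the k-th kept element is xs[2k]
def pvStride2 (xs : List Int) : List Int :=
  (List.range ((xs.length + 1) / 2)).filterMap (fun k => xs[2 * k]?)

theorem pvStride2_append (ys : List Int) (z : Int) :
    pvStride2 (ys ++ [z]) = pvStride2 ys ++ (if ys.length % 2 = 0 then [z] else []) := by
  unfold pvStride2
  have hcong : ∀ k ∈ List.range ((ys.length + 1) / 2),
      (ys ++ [z])[2 * k]? = ys[2 * k]? := by
    intro k hk
    rw [List.mem_range] at hk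
    rw [List.getElem?_append_left (by omega)]
  rcases Nat.even_or_odd ys.length with ⟨m, hm⟩ | ⟨m, hm⟩
  · have h1 : (ys.length + 1 + 1) / 2 = (ys.length + 1) / 2 + 1 := by omega
    have h2 : ys.length % 2 = 0 := by omega
    rw [List.length_append, List.length_singleton, h1, List.range_succ,
        List.filterMap_append, List.filterMap_congr hcong, h2]
    simp only [if_true]
    congr 1
    have h3 : 2 * ((ys.length + 1) / 2) = ys.length := by omega
    simp [h3]
  · have h1 : (ys.length + 1 + 1) / 2 = (ys.length + 1) / 2 := by omega
    have h2 : ¬ ys.length % 2 = 0 := by omega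
    rw [List.length_append, List.length_singleton, h1,
        List.filterMap_congr hcong, if_neg h2, List.append_nil]

theorem pvSlice2 (xs : List Int) :
    PySem.List.slice? xs none none 2 = some (pvStride2 xs) := by
  unfold PySem.List.slice? PySem.List.sliceIndices pvStride2
  norm_num
  have hc : (if 0 < xs.length then (((xs.length : Int) + 2 - 1) / 2).toNat else 0)
      = (xs.length + 1) / 2 := by split <;> omega
  rw [hc]
  apply List.filterMap_congr
  intro k _
  congr 1

theorem pvMain (xs : List Int) :
    arrumar_numeros xs = (xs.filter (fun x => PySem.Int.mod x 2 == 1), pvStride2 xs) := by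
  induction xs using List.reverseRecOn with
  | nil => decide
  | append_singleton ys z ih =>
    unfold arrumar_numeros at ih ⊢
    have hlen : ((ys ++ [z]).length : Int) = (ys.length : Int) + 1 := by
      simp
    rw [hlen, PySem.List.pyRange_one_succ_right (by positivity), List.foldl_append]
    have hcong := PySem.List.foldl_congr_mem
      (l := PySem.List.pyRange 0 (ys.length : Int) 1)
      (init := (([] : List Int), ([] : List Int)))
      (f := fun (st : List Int × List Int) (indice : Int) =>
        let st1 :=
          if PySem.Int.mod (PySem.List.pyGetD (ys ++ [z]) indice 0) 2 = 1 then
            (st.1 ++ [PySem.List.pyGetD (ys ++ [z]) indice 0], st.2)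
          else st
        if PySem.Int.mod indice 2 = 0 then
          (st1.1, st1.2 ++ [PySem.List.pyGetD (ys ++ [z]) indice 0])
        else st1)
      (g := fun (st : List Int × List Int) (indice : Int) =>
        let st1 :=
          if PySem.Int.mod (PySem.List.pyGetD ys indice 0) 2 = 1 then
            (st.1 ++ [PySem.List.pyGetD ys indice 0], st.2)
          else st
        if PySem.Int.mod indice 2 = 0 then
          (st1.1, st1.2 ++ [PySem.List.pyGetD ys indice 0])
        else st1)
      (by
        intro acc i hi
        rw [PySem.List.mem_pyRange_one] at hi
        have hget : PySem.List.pyGetD (ys ++ [z]) i 0 = PySem.List.pyGetD ys i 0 := by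
          rw [PySem.List.pyGetD_eq_getElem _ 0 hi.1 (by simp; omega),
              PySem.List.pyGetD_eq_getElem _ 0 hi.1 (by exact_mod_cast hi.2),
              List.getElem_append_left (by omega)]
        simp only [hget])
    rw [hcong, ih]
    have hlast : PySem.List.pyGetD (ys ++ [z]) (ys.length : Int) 0 = z := by
      rw [PySem.List.pyGetD_eq_getElem _ 0 (by omega) (by simp)]
      simp
    have hmodn : PySem.Int.mod (ys.length : Int) 2 = ((ys.length % 2 : Nat) : Int) := by
      rw [PySem.Int.mod_eq_emod_of_pos (by omega)]
      omega
    simp only [List.foldl_cons, List.foldl_nil, hlast, hmodn, pvStride2_append,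
      List.filter_append, List.filter_singleton]
    have hp2 : ((2:Int) ∣ (ys.length:Int)) ↔ ys.length % 2 = 0 := by omega
    by_cases hz : z % 2 = 1 <;>
      by_cases hp : ys.length % 2 = 0 <;>
        simp [hz, hp, hp2, Prod.ext_iff] <;> simp [Bool.cond_eq_ite, beq_iff_eq, hz]

theorem arrumar_numeros_spec : Claim_equal_arrumar_numeros := by
  intro xs _
  unfold Spec_arrumar_numeros arrumar_numeros_alt
  rw [pvMain, pvSlice2]
  rfl
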